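-- pv_equiv track=rewrite | github.com/ssoyeong-lee/Baekjoon | 프로그래머스/2/12951. JadenCase 문자열 만들기/JadenCase 문자열 만들기.py | solution
-- ===== SOURCE A (Python) =====
-- def solution(s):
--     start, end = 0, 0
--     ret = ''
--     while end <= len(s):
--         if end == len(s) or (s[start] == ' ' and s[end] != ' ') or (s[start] != ' ' and s[end] == ' '):
--             ret += s[start].upper() + s[start + 1: end].lower()
--             start = end
--         end += 1
--
--     return ret
-- ===== SOURCE B (Python) =====
-- def solution(s):
--     first = s[0].upper()
--     rest = [c.upper() if p == ' ' else c.lower() for p, c in zip(s, s[1:])]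
--     return first + ''.join(rest)
-- ===== Notes on version B (the rewrite author's own statement) =====
-- stated objective: simpler
-- what changed: A maintains two pointers and emits capitalize-first/lowercase-rest chunks at run boundaries via slicing; B is a single zip pass that decides each character solely from its predecessor (upper after a space, else lower), with the first character uppercased.
import Mathlib
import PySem

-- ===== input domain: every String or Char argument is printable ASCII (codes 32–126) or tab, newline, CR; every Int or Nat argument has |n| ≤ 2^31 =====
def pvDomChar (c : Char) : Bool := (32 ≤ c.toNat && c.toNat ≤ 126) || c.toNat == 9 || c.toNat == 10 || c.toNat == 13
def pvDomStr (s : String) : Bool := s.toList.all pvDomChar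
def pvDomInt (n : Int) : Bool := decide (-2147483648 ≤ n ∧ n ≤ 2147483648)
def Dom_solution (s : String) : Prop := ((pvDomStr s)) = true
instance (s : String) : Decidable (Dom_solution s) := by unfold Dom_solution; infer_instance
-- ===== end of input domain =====

-- B replaces A's two-pointer run-splitting loop with a single zip pass deciding each
-- character from its predecessor (objective: simpler; same O(n) cost).

-- ===== PORT A =====
-- A's while-loop: state (start, end, ret); end counts 0..len(s) inclusive; at a
-- run boundary the chunk s[start].upper() + s[start+1:end].lower() is appended.
-- s[start]/s[end] are read with getD ' ': exact for the in-range indices reached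
-- on every nonempty string (the empty string, where Python raises, is outside Pre_).
def solLoop (l : List Char) (start fin : Nat) (ret : List Char) : List Char :=
  if _h : fin ≤ l.length then
    if fin = l.length ∨ (l.getD start ' ' = ' ' ∧ l.getD fin ' ' ≠ ' ')
        ∨ (l.getD start ' ' ≠ ' ' ∧ l.getD fin ' ' = ' ') then
      solLoop l fin (fin + 1)
        (ret ++ PySem.Chars.upperChar (l.getD start ' ') ::
          PySem.Chars.lower (PySem.List.slice l (some ((start : Int) + 1)) (some (fin : Int))))
    else
      solLoop l start (fin + 1) ret
  else ret
termination_by l.length + 1 - fin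
decreasing_by all_goals omega

def solution (s : String) : String := String.ofList (solLoop s.toList 0 0 [])

-- ===== PORT B =====
def solution_alt (s : String) : String :=
  match s.toList with
  | [] => ""   -- unreachable under Pre_: Python B raises IndexError on s[0]
  | c :: rest =>
    String.ofList (PySem.Chars.upperChar c ::
      (List.zip (c :: rest) rest).map
        (fun pc => if pc.1 = ' ' then PySem.Chars.upperChar pc.2 else PySem.Chars.lowerChar pc.2))

-- ===== PRECONDITION & SPEC =====
-- Pre_ excludes only the empty string, on which both A and B raise IndexError.
def Pre_solution (s : String) : Prop := s ≠ ""
instance (s : String) : Decidable (Pre_solution s) := by unfold Pre_solution; infer_instance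
def pvWitness_solution : String := ("hello  worLD x")

def Spec_solution (s : String) (out : String) : Prop := out = solution_alt s
instance (s : String) (out : String) : Decidable (Spec_solution s out) := by unfold Spec_solution; infer_instance

-- ===== CLAIM (what is proved, stated in full; the proofs are below) =====
def Claim_equal_solution : Prop := ∀ (s : String), Dom_solution s → Pre_solution s → Spec_solution s (solution s)

-- ===== LEMMAS AND PROOFS =====

/-- spaceness of a character -/
def sp (c : Char) : Bool := decide (c = ' ')

/-- pointwise rule of B, prev-spaceness threaded as a Bool -/
def bmap : Bool → List Char → List Char
  | _, [] => []
  | b, c :: cs => (if b then PySem.Chars.upperChar c else PySem.Chars.lowerChar c) :: bmap (sp c) cs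

theorem upper_space : PySem.Chars.upperChar ' ' = ' ' := by decide
theorem lower_space : PySem.Chars.lowerChar ' ' = ' ' := by decide

theorem zip_map_eq_bmap : ∀ (l : List Char) (p : Char),
    (List.zip (p :: l) l).map
      (fun pc => if pc.1 = ' ' then PySem.Chars.upperChar pc.2 else PySem.Chars.lowerChar pc.2)
      = bmap (sp p) l := by
  intro l
  induction l with
  | nil => intro p; rfl
  | cons c cs ih =>
    intro p
    simp only [List.zip_cons_cons, List.map_cons, bmap, ih c, sp]
    by_cases h : p = ' ' <;> simp [h]

theorem bmap_const (xs : List Char) : ∀ (b : Bool), (∀ c ∈ xs, sp c = b) →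
    bmap b xs = xs.map PySem.Chars.lowerChar := by
  induction xs with
  | nil => intro b _; rfl
  | cons x xs ih =>
    intro b h
    have hx : sp x = b := h x (by simp)
    simp only [bmap, List.map_cons, hx]
    congr 1
    · cases b with
      | false => simp
      | true =>
        have : x = ' ' := by simpa [sp] using hx
        simp [this, upper_space, lower_space]
    · exact ih b (fun c hc => h c (by simp [hc]))

theorem bmap_append (xs : List Char) : ∀ (b : Bool) (ys : List Char), (∀ c ∈ xs, sp c = b) →
    bmap b (xs ++ ys) = xs.map PySem.Chars.lowerChar ++ bmap b ys := by
  induction xs with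
  | nil => intro b ys _; rfl
  | cons x xs ih =>
    intro b ys h
    have hx : sp x = b := h x (by simp)
    simp only [List.cons_append, bmap, List.map_cons, hx]
    congr 1
    · cases b with
      | false => simp
      | true =>
        have : x = ' ' := by simpa [sp] using hx
        simp [this, upper_space, lower_space]
    · exact ih b ys (fun c hc => h c (by simp [hc]))

theorem sp_of_mem_drop_take (l : List Char) (a b : Nat) (t : Bool)
    (h : ∀ i, a ≤ i → i < b → sp (l.getD i ' ') = t) :
    ∀ c ∈ (l.drop a).take (b - a), sp c = t := by
  intro c hc
  rw [List.mem_iff_getElem] at hc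
  obtain ⟨j, hj, hcj⟩ := hc
  have hj1 : j < b - a := lt_of_lt_of_le hj (by simp [List.length_take])
  have hj2 : a + j < l.length := by
    have := hj
    simp [List.length_take, List.length_drop] at this
    omega
  have : ((l.drop a).take (b - a))[j] = l[a + j] := by
    rw [List.getElem_take, List.getElem_drop]
  rw [this] at hcj
  have hgd : l.getD (a + j) ' ' = l[a + j] := List.getD_eq_getElem l ' ' hj2
  subst hcj
  rw [← hgd]
  exact h (a + j) (by omega) (by omega)

theorem loop_eq (l : List Char) : ∀ (k fin start : Nat) (ret : List Char),
    l.length - fin = k → start < l.length → start ≤ fin → fin ≤ l.length →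
    (∀ i, start ≤ i → i < fin → sp (l.getD i ' ') = sp (l.getD start ' ')) →
    solLoop l start fin ret
      = ret ++ PySem.Chars.upperChar (l.getD start ' ')
          :: bmap (sp (l.getD start ' ')) (l.drop (start + 1)) := by
  intro k
  induction k using Nat.strong_induction_on with
  | _ k IH =>
    intro fin start ret hk hs hsf hfl hrun
    have hcast : ((start : Int) + 1) = ((start + 1 : Nat) : Int) := by push_cast; ring
    have hlow : ∀ xs : List Char, PySem.Chars.lower xs = xs.map PySem.Chars.lowerChar := by
      intro xs; simp [PySem.Chars.lower]
    by_cases hfin : fin = l.length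
    · subst hfin
      rw [solLoop, dif_pos hfl, if_pos (Or.inl rfl), solLoop, dif_neg (by omega)]
      congr 2
      rw [hcast, PySem.List.slice_natCast, hlow]
      have htake : (l.drop (start + 1)).take (l.length - (start + 1)) = l.drop (start + 1) := by
        apply List.take_of_length_le; simp
      rw [htake]
      symm
      apply bmap_const
      intro c hc
      refine sp_of_mem_drop_take l (start + 1) l.length _
        (fun i h1 h2 => hrun i (by omega) (by omega)) c ?_
      rwa [htake]
    · have hflt : fin < l.length := by omega
      by_cases hsp : sp (l.getD fin ' ') = sp (l.getD start ' ')
      · rw [solLoop, dif_pos hfl, if_neg ?_]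
        · refine IH (k - 1) (by omega) (fin + 1) start ret (by omega) hs (by omega) (by omega) ?_
          intro i h1 h2
          by_cases hi : i < fin
          · exact hrun i h1 hi
          · have : i = fin := by omega
            subst this; exact hsp
        · simp only [sp, decide_eq_decide] at hsp
          rintro (h | ⟨h1, h2⟩ | ⟨h1, h2⟩)
          · exact hfin h
          · exact h2 (hsp.mpr h1)
          · exact h1 (hsp.mp h2)
      · simp only [sp, decide_eq_decide] at hsp
        have hslt : start < fin := by
          rcases Nat.lt_or_ge start fin with h | h
          · exact h
          · exfalso; apply hsp; have : start = fin := by omega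
            rw [this]
        have hcond : (l.getD start ' ' = ' ' ∧ l.getD fin ' ' ≠ ' ')
            ∨ (l.getD start ' ' ≠ ' ' ∧ l.getD fin ' ' = ' ') := by tauto
        rw [solLoop, dif_pos hfl, if_pos (Or.inr hcond)]
        rw [IH (k - 1) (by omega) (fin + 1) fin _ (by omega) hflt (by omega) (by omega)
          (by
            intro i h1 h2
            have hif : i = fin := by omega
            subst hif
            rfl)]
        rw [hcast, PySem.List.slice_natCast, hlow]
        have hseg : ∀ c ∈ (l.drop (start + 1)).take (fin - (start + 1)),
            sp c = sp (l.getD start ' ') :=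
          sp_of_mem_drop_take l (start + 1) fin _ (fun i h1 h2 => hrun i (by omega) h2)
        have hsplit : l.drop (start + 1)
            = (l.drop (start + 1)).take (fin - (start + 1)) ++ l.getD fin ' ' :: l.drop (fin + 1) := by
          have h1 : l.drop fin = l[fin] :: l.drop (fin + 1) := List.drop_eq_getElem_cons hflt
          have h2 : l.getD fin ' ' = l[fin] := List.getD_eq_getElem l ' ' hflt
          calc l.drop (start + 1)
              = (l.drop (start + 1)).take (fin - (start + 1))
                ++ (l.drop (start + 1)).drop (fin - (start + 1)) := (List.take_append_drop _ _).symm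
            _ = (l.drop (start + 1)).take (fin - (start + 1)) ++ l.drop fin := by
                rw [List.drop_drop]; congr 2; omega
            _ = _ := by rw [h1, h2]
        conv_rhs => rw [hsplit]
        rw [bmap_append _ _ _ hseg]
        simp only [bmap]
        have hhead : (if sp (l.getD start ' ') = true then PySem.Chars.upperChar (l.getD fin ' ')
            else PySem.Chars.lowerChar (l.getD fin ' ')) = PySem.Chars.upperChar (l.getD fin ' ') := by
          by_cases hb : l.getD start ' ' = ' '
          · have ht : sp (l.getD start ' ') = true := by simp only [sp]; exact decide_eq_true hb
            rw [ht]; simp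
          · have hfsp : l.getD fin ' ' = ' ' := by tauto
            have ht : sp (l.getD start ' ') = false := by simp only [sp]; exact decide_eq_false hb
            rw [ht, hfsp]
            simp [upper_space, lower_space]
        rw [hhead]
        simp [List.append_assoc]

theorem solution_spec : Claim_equal_solution := by
  unfold Claim_equal_solution
  intro s _hdom hpre
  unfold Spec_solution
  have hl : s.toList ≠ [] := by
    intro h
    apply hpre
    have := congrArg String.ofList h
    simpa using this
  obtain ⟨c, rest, hcr⟩ := List.exists_cons_of_ne_nil hl
  unfold solution solution_alt
  rw [hcr]
  rw [loop_eq (c :: rest) (c :: rest).length 0 0 [] rfl (by simp) (Nat.le_refl 0)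
    (by omega) (by intro i h1 h2; omega)]
  simp [zip_map_eq_bmap, List.getD]
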